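-- pv_equiv track=rewrite | github.com/wangyanhui666/debug_streaming_accelerate | preprocess_data/extract_imagefeature_to_streaming.py | distribute_indices_to_gpus
-- ===== SOURCE A (Python) =====
-- def distribute_indices_to_gpus(total_indices, num_gpus):
--     # 计算每个 GPU 处理的基本索引数
--     base_size = total_indices // num_gpus
--     remainder = total_indices % num_gpus  # 计算剩余的索引数
--
--     indices_ranges = []
--
--     start_index = 0
--     for i in range(num_gpus):
--         # 如果是最后一个 GPU，处理剩余所有数据
--         if i == num_gpus - 1:
--             end_index = total_indices
--         else:
--             end_index = start_index + base_size
--             # 给一些 GPU 分配多余的索引（尽量均匀）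
--             if remainder > 0:
--                 end_index += 1
--                 remainder -= 1
--
--         # 将当前 GPU 负责的索引范围加入到列表
--         indices_ranges.append((start_index, end_index - 1))
--
--         # 更新下一个区间的起始索引
--         start_index = end_index
--
--     return indices_ranges
-- ===== SOURCE B (Python) =====
-- def distribute_indices_to_gpus(total_indices, num_gpus):
--     base, rem = divmod(total_indices, num_gpus)
--     return [(i * base + min(i, rem), (i + 1) * base + min(i + 1, rem) - 1)
--             for i in range(num_gpus)]
-- ===== Notes on version B (the rewrite author's own statement) =====
-- stated objective: simpler
-- what changed: Replaced the stateful loop (running start_index, decrementing remainder, special last-GPU branch) with a single comprehension computing each range in closed form: start = i*base + min(i, rem), end = (i+1)*base + min(i+1, rem).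
import Mathlib
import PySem

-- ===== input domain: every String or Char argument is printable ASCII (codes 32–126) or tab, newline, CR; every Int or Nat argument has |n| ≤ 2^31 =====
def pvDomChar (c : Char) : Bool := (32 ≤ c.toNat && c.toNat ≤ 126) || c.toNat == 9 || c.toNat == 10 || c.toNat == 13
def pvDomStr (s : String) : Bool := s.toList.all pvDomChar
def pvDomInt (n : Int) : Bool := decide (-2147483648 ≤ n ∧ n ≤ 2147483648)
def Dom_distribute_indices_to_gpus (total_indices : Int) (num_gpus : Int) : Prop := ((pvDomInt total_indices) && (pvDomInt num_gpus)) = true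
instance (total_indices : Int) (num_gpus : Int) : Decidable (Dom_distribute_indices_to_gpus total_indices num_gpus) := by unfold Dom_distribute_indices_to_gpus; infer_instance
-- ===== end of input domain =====

-- B replaces the stateful loop (running start, decrementing remainder, special last-GPU
-- branch) with one closed-form comprehension; objective: simpler.

-- ===== PORT A =====
-- loop body of A's for-loop, as a helper; state = (indices_ranges, start_index, remainder)
def pvStepA (total_indices : Int) (num_gpus : Int) (base_size : Int)
    (st : List (Int × Int) × Int × Int) (i : Int) : List (Int × Int) × Int × Int :=
  let ranges := st.1
  let start_index := st.2.1
  let rem := st.2.2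
  let er : Int × Int :=
    if i == num_gpus - 1 then (total_indices, rem)
    else
      let e := start_index + base_size
      if rem > 0 then (e + 1, rem - 1) else (e, rem)
  (ranges ++ [(start_index, er.1 - 1)], er.1, er.2)

def distribute_indices_to_gpus (total_indices : Int) (num_gpus : Int) : List (Int × Int) :=
  let base_size := PySem.Int.floordiv total_indices num_gpus
  let remainder := PySem.Int.mod total_indices num_gpus
  ((PySem.List.pyRange 0 num_gpus 1).foldl
      (pvStepA total_indices num_gpus base_size)
      ([], 0, remainder)).1

-- ===== PORT B =====
def distribute_indices_to_gpus_alt (total_indices : Int) (num_gpus : Int) : List (Int × Int) :=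
  let base := PySem.Int.floordiv total_indices num_gpus
  let rem := PySem.Int.mod total_indices num_gpus
  (PySem.List.pyRange 0 num_gpus 1).map
    (fun i => (i * base + min i rem, (i + 1) * base + min (i + 1) rem - 1))

-- ===== PRECONDITION & SPEC =====
-- Pre_ excludes exactly num_gpus = 0, where Python A raises ZeroDivisionError.
def Pre_distribute_indices_to_gpus (_total_indices : Int) (num_gpus : Int) : Prop := num_gpus ≠ 0
instance (total_indices : Int) (num_gpus : Int) : Decidable (Pre_distribute_indices_to_gpus total_indices num_gpus) := by unfold Pre_distribute_indices_to_gpus; infer_instance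

def pvWitness_distribute_indices_to_gpus : Int × Int := (10, 3)

def Spec_distribute_indices_to_gpus (total_indices : Int) (num_gpus : Int) (out : List (Int × Int)) : Prop := out = distribute_indices_to_gpus_alt total_indices num_gpus
instance (total_indices : Int) (num_gpus : Int) (out : List (Int × Int)) : Decidable (Spec_distribute_indices_to_gpus total_indices num_gpus out) := by unfold Spec_distribute_indices_to_gpus; infer_instance

-- ===== CLAIM (what is proved, stated in full; the proofs are below) =====
def Claim_equal_distribute_indices_to_gpus : Prop := ∀ (total_indices : Int) (num_gpus : Int), Dom_distribute_indices_to_gpus total_indices num_gpus → Pre_distribute_indices_to_gpus total_indices num_gpus → Spec_distribute_indices_to_gpus total_indices num_gpus (distribute_indices_to_gpus total_indices num_gpus)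

-- ===== LEMMAS AND PROOFS =====

-- closed-form description of B's per-GPU range
def pvG (base rem : Int) (i : Int) : Int × Int :=
  (i * base + min i rem, (i + 1) * base + min (i + 1) rem - 1)

-- loop invariant for A's fold over the first k (non-last) iterations
theorem pvInvA (t n base rem : Int) (hrem0 : 0 ≤ rem) :
    ∀ k : Nat, (k : Int) ≤ n - 1 →
      (PySem.List.pyRange 0 (k : Int) 1).foldl (pvStepA t n base) ([], 0, rem)
        = ((PySem.List.pyRange 0 (k : Int) 1).map (pvG base rem),
           (k : Int) * base + min (k : Int) rem, rem - min (k : Int) rem) := by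
  intro k
  induction k with
  | zero =>
    intro _
    simp only [Nat.cast_zero, PySem.List.pyRange_one_eq_nil (le_refl (0:Int)),
      List.foldl_nil, List.map_nil, Prod.mk.injEq]
    refine ⟨by trivial, by omega, by omega⟩
  | succ m ih =>
    intro hk
    have hm : (m : Int) ≤ n - 1 := by push_cast at hk ⊢; omega
    have hsplit : PySem.List.pyRange 0 ((m : Int) + 1) 1
        = PySem.List.pyRange 0 (m : Int) 1 ++ [(m : Int)] :=
      PySem.List.pyRange_one_succ_right (by omega)
    have hcast : ((m.succ : Nat) : Int) = (m : Int) + 1 := by push_cast; ring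
    rw [hcast, hsplit, List.foldl_append, List.map_append, ih hm]
    have hne : ¬ ((m : Int) == n - 1) = true := by
      simp only [beq_iff_eq]
      push_cast at hk
      omega
    simp only [pvStepA, List.foldl_cons, List.foldl_nil, hne, Bool.false_eq_true,
      List.map_cons, List.map_nil, pvG]
    by_cases hlt : (m : Int) < rem
    · have h1 : min (m : Int) rem = (m : Int) := by omega
      have h2 : min ((m : Int) + 1) rem = (m : Int) + 1 := by omega
      simp only [h1, h2]
      rw [if_pos (by omega : rem - (m : Int) > 0)]
      simp only [if_false, Prod.mk.injEq, List.append_right_inj, List.cons.injEq, and_true]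
      and_intros <;> first | trivial | ring
    · have h1 : min (m : Int) rem = rem := by omega
      have h2 : min ((m : Int) + 1) rem = rem := by omega
      simp only [h1, h2]
      rw [if_neg (by omega : ¬ rem - rem > 0)]
      simp only [if_false, Prod.mk.injEq, List.append_right_inj, List.cons.injEq, and_true]
      and_intros <;> first | trivial | ring

-- ===== VERDICT (by name: the statement is the Claim_ definition above) =====
theorem distribute_indices_to_gpus_spec : Claim_equal_distribute_indices_to_gpus := by
  intro t n _ hn
  simp only [Spec_distribute_indices_to_gpus, distribute_indices_to_gpus,
    distribute_indices_to_gpus_alt]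
  by_cases hpos : 0 < n
  · set base := PySem.Int.floordiv t n with hbase
    set rem := PySem.Int.mod t n with hrem
    have hrem0 : 0 ≤ rem := PySem.Int.mod_nonneg t hpos
    have hremlt : rem < n := PySem.Int.mod_lt t hpos
    have htot : base * n + rem = t := PySem.Int.floordiv_mul_add_mod t n
    have hsplit : PySem.List.pyRange 0 n 1
        = PySem.List.pyRange 0 (n - 1) 1 ++ [n - 1] := by
      have := PySem.List.pyRange_one_succ_right (a := 0) (b := n - 1) (by omega)
      simpa using this
    have hk : ((n - 1).toNat : Int) = n - 1 := Int.toNat_of_nonneg (by omega)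
    have hinv := pvInvA t n base rem hrem0 (n - 1).toNat (by omega)
    rw [hk] at hinv
    rw [hsplit]
    simp only [List.foldl_append, List.map_append]
    rw [hinv]
    have heq : ((n - 1) == n - 1) = true := by simp
    simp only [pvStepA, List.foldl_cons, List.foldl_nil, heq, if_pos, List.map_cons,
      List.map_nil]
    have h1 : min (n - 1) rem = rem := by omega
    have h2 : min ((n - 1) + 1) rem = rem := by omega
    refine congrArg₂ _ rfl ?_
    refine congrArg₂ _ (Prod.ext ?_ ?_) rfl
    · simp [h1]
    · simp only [h2]
      linear_combination -htot
  · have hle : n ≤ 0 := by omega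
    simp [PySem.List.pyRange_one_eq_nil hle]
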